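-- pv_equiv track=rewrite | github.com/hehaivictor/deepinsight | scripts/agent_scenario_scaffold.py | parse_manual_cases
-- ===== SOURCE A (Python) =====
-- def merge_case_entries(*groups: list[dict[str, str]]) -> list[dict[str, str]]:
--     merged: list[dict[str, str]] = []
--     seen: set[str] = set()
--     for group in groups:
--         for item in group:
--             test_id = str(item.get("test_id") or "").strip()
--             if not test_id or test_id in seen:
--                 continue
--             seen.add(test_id)
--             merged.append(
--                 {
--                     "test_id": test_id,
--                     "label": str(item.get("label") or test_id).strip() or test_id,
--                 }
--             )
--     return merged
--
-- def parse_manual_cases(values: list[str]) -> list[dict[str, str]]: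
--     parsed: list[dict[str, str]] = []
--     for raw in values:
--         text = str(raw or "").strip()
--         if not text:
--             continue
--         if "=" in text:
--             test_id, label = text.split("=", 1)
--         else:
--             test_id, label = text, text
--         test_id = test_id.strip()
--         if not test_id:
--             continue
--         parsed.append({"test_id": test_id, "label": label.strip() or test_id})
--     return merge_case_entries(parsed)
-- ===== SOURCE B (Python) =====
-- def parse_manual_cases(values):
--     by_id = {}
--     for raw in values:
--         text = str(raw or "").strip()
--         if not text:
--             continue
--         test_id, label = text.split("=", 1) if "=" in text else (text, text)
--         test_id = test_id.strip()
--         if test_id and test_id not in by_id: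
--             by_id[test_id] = {"test_id": test_id, "label": label.strip() or test_id}
--     return list(by_id.values())
-- ===== Notes on version B (the rewrite author's own statement) =====
-- stated objective: simpler
-- what changed: B fuses A's two-pass parse-then-merge structure (helper function, intermediate parsed list of dicts, separate seen set) into a single pass that dedups by inserting first occurrences into a dict keyed by test_id and returning its values.
import Mathlib
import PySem

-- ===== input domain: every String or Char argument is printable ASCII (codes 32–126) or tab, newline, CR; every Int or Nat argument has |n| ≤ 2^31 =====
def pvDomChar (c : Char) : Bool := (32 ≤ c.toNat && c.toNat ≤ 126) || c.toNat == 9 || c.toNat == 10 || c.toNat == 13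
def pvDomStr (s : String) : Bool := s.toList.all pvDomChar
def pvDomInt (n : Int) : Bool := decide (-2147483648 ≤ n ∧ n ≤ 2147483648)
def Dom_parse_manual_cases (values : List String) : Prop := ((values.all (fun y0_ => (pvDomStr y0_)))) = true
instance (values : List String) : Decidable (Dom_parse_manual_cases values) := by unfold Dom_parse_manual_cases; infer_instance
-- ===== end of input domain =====

-- B fuses A's parse-then-merge two-pass structure (helper merge_case_entries + intermediate parsed list + seen set)
-- into a single pass that dedups via a dict keyed by test_id; objective: simpler.


-- ===== PORT A =====
-- item.get(k) on an assoc-list dict (first matching key), per the type convention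
def pmcDictGet (item : List (String × String)) (k : String) : Option String :=
  (item.find? (fun p => p.1 == k)).map (·.2)

-- the body of merge_case_entries' inner loop
def pmcMergeStep (st : List (List (String × String)) × PySem.Set String)
    (item : List (String × String)) : List (List (String × String)) × PySem.Set String :=
  let test_id := PySem.Str.strip ((pmcDictGet item "test_id").getD "")
  if test_id = "" ∨ PySem.Set.contains st.2 test_id then st
  else
    let lab0 := (pmcDictGet item "label").getD ""
    let lab1 := if lab0 = "" then test_id else lab0
    let lab2 := PySem.Str.strip lab1
    (st.1 ++ [[("test_id", test_id), ("label", if lab2 = "" then test_id else lab2)]],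
     PySem.Set.add st.2 test_id)

def merge_case_entries (groups : List (List (List (String × String)))) :
    List (List (String × String)) :=
  (groups.foldl (fun st group => group.foldl pmcMergeStep st) ([], PySem.Set.empty)).1

-- the body of parse_manual_cases' loop
def pmcParseStep (parsed : List (List (String × String))) (raw : String) :
    List (List (String × String)) :=
  let text := PySem.Str.strip (if raw = "" then "" else raw)   -- str(raw or "").strip()
  if text = "" then parsed
  else
    let pr : String × String :=
      if PySem.Str.isIn "=" text then
        match PySem.Str.splitMax? text "=" 1 with
        | some (a :: b :: _) => (a, b)
        | _ => (text, text)   -- unreachable: "=" is a nonempty separator present in text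
      else (text, text)
    let test_id := PySem.Str.strip pr.1
    if test_id = "" then parsed
    else parsed ++ [[("test_id", test_id), ("label",
        let ls := PySem.Str.strip pr.2; if ls = "" then test_id else ls)]]

def parse_manual_cases (values : List String) : List (List (String × String)) :=
  merge_case_entries [values.foldl pmcParseStep []]

-- ===== PORT B =====
-- the body of B's single loop, folding into a dict keyed by test_id
def pmcAltStep (by_id : PySem.Dict String (List (String × String))) (raw : String) :
    PySem.Dict String (List (String × String)) :=
  let text := PySem.Str.strip (if raw = "" then "" else raw)   -- str(raw or "").strip()
  if text = "" then by_id
  else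
    let pr : String × String :=
      if PySem.Str.isIn "=" text then
        match PySem.Str.splitMax? text "=" 1 with
        | some (a :: b :: _) => (a, b)
        | _ => (text, text)   -- unreachable: "=" is a nonempty separator present in text
      else (text, text)
    let test_id := PySem.Str.strip pr.1
    if test_id ≠ "" ∧ by_id.contains test_id = false then
      by_id.insert test_id [("test_id", test_id), ("label",
        let ls := PySem.Str.strip pr.2; if ls = "" then test_id else ls)]
    else by_id

def parse_manual_cases_alt (values : List String) : List (List (String × String)) :=
  (values.foldl pmcAltStep PySem.Dict.empty).values

-- ===== PRECONDITION & SPEC =====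
def Spec_parse_manual_cases (values : List String) (out : List (List (String × String))) : Prop := out = parse_manual_cases_alt values
instance (values : List String) (out : List (List (String × String))) : Decidable (Spec_parse_manual_cases values out) := by unfold Spec_parse_manual_cases; infer_instance

-- ===== CLAIM (what is proved, stated in full; the proofs are below) =====
def Claim_equal_parse_manual_cases : Prop := ∀ (values : List String), Dom_parse_manual_cases values → Spec_parse_manual_cases values (parse_manual_cases values)

-- ===== LEMMAS AND PROOFS =====

-- dropWhile is idempotent
theorem pmc_dropWhile_idem {α : Type} (p : α → Bool) (l : List α) :
    (l.dropWhile p).dropWhile p = l.dropWhile p := by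
  induction l with
  | nil => simp
  | cons a t ih => by_cases h : p a <;> simp [List.dropWhile_cons, h, ih]

-- a prefix of a dropWhile-fixed list is dropWhile-fixed
theorem pmc_dropWhile_prefix {α : Type} (p : α → Bool) {x y : List α}
    (h : x.dropWhile p = x) (hp : y <+: x) : y.dropWhile p = y := by
  cases y with
  | nil => simp
  | cons a t =>
    cases x with
    | nil => exact absurd hp (by simp)
    | cons b u =>
      obtain ⟨rfl, -⟩ := List.cons_prefix_cons.mp hp
      have hb : p a = false := by
        by_contra hh
        rw [Bool.not_eq_false] at hh
        rw [List.dropWhile_cons, if_pos hh] at h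
        have := congrArg List.length h
        have hle := List.length_dropWhile_le p u
        simp at this; omega
      simp [List.dropWhile_cons, hb]

theorem pmc_chars_strip_idem (cs : List Char) :
    PySem.Chars.strip (PySem.Chars.strip cs) = PySem.Chars.strip cs := by
  unfold PySem.Chars.strip PySem.Chars.rstrip PySem.Chars.lstrip
  set p := PySem.Chars.isspace with hp
  set a := cs.dropWhile p with ha
  set b := (a.reverse.dropWhile p).reverse with hb
  have hbrev : b.reverse = a.reverse.dropWhile p := by rw [hb, List.reverse_reverse]
  have hba : b <+: a := by
    have : b.reverse <:+ a.reverse := hbrev ▸ List.dropWhile_suffix p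
    exact List.reverse_suffix.mp (by simpa [hb] using this)
  have hlb : b.dropWhile p = b :=
    pmc_dropWhile_prefix p (by rw [ha]; exact pmc_dropWhile_idem p cs) hba
  rw [hlb, hbrev, pmc_dropWhile_idem, ← hbrev, List.reverse_reverse]

theorem pmc_strip_idem (s : String) :
    PySem.Str.strip (PySem.Str.strip s) = PySem.Str.strip s := by
  have h : (PySem.Str.strip (PySem.Str.strip s)).toList = (PySem.Str.strip s).toList := by
    rw [PySem.Str.toList_strip, PySem.Str.toList_strip, pmc_chars_strip_idem]
  exact String.toList_inj.mp h

-- the (test_id, label) a raw line contributes, if any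
def pmcKey (raw : String) : Option (String × String) :=
  let text := PySem.Str.strip (if raw = "" then "" else raw)
  if text = "" then none
  else
    let pr : String × String :=
      if PySem.Str.isIn "=" text then
        match PySem.Str.splitMax? text "=" 1 with
        | some (a :: b :: _) => (a, b)
        | _ => (text, text)
      else (text, text)
    let test_id := PySem.Str.strip pr.1
    if test_id = "" then none
    else some (test_id, (let ls := PySem.Str.strip pr.2; if ls = "" then test_id else ls))

def pmcEntry (t l : String) : List (String × String) := [("test_id", t), ("label", l)]

def pmcOne (raw : String) : List (List (String × String)) :=
  match pmcKey raw with
  | none => []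
  | some (t, l) => [pmcEntry t l]

theorem pmcParseStep_eq (parsed : List (List (String × String))) (raw : String) :
    pmcParseStep parsed raw = parsed ++ pmcOne raw := by
  unfold pmcParseStep pmcOne pmcKey pmcEntry
  dsimp only
  set text := PySem.Str.strip (if raw = "" then "" else raw) with htext
  set pr := (if PySem.Str.isIn "=" text = true then
      match PySem.Str.splitMax? text "=" 1 with
      | some (a :: b :: _) => (a, b)
      | _ => (text, text)
    else (text, text)) with hpr
  set t := PySem.Str.strip pr.1 with htid
  set l := (if PySem.Str.strip pr.2 = "" then t else PySem.Str.strip pr.2) with hlab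
  by_cases h1 : text = ""
  · simp [h1]
  · simp only [if_neg h1]
    by_cases h2 : t = ""
    · simp [h2]
    · simp [h2]

theorem pmcAltStep_eq (d : PySem.Dict String (List (String × String))) (raw : String) :
    pmcAltStep d raw = match pmcKey raw with
      | none => d
      | some (t, l) => if d.contains t then d else d.insert t (pmcEntry t l) := by
  unfold pmcAltStep pmcKey pmcEntry
  dsimp only
  set text := PySem.Str.strip (if raw = "" then "" else raw) with htext
  set pr := (if PySem.Str.isIn "=" text = true then
      match PySem.Str.splitMax? text "=" 1 with
      | some (a :: b :: _) => (a, b)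
      | _ => (text, text)
    else (text, text)) with hpr
  set t := PySem.Str.strip pr.1 with htid
  set l := (if PySem.Str.strip pr.2 = "" then t else PySem.Str.strip pr.2) with hlab
  by_cases h1 : text = ""
  · simp [h1]
  · simp only [if_neg h1]
    by_cases h2 : t = ""
    · simp [h2]
    · by_cases h3 : d.contains t <;> simp [h2, h3]

theorem pmcKey_props {raw t l : String} (h : pmcKey raw = some (t, l)) :
    PySem.Str.strip t = t ∧ t ≠ "" ∧ PySem.Str.strip l = l ∧ l ≠ "" := by
  unfold pmcKey at h
  dsimp only at h
  set text := PySem.Str.strip (if raw = "" then "" else raw) with htext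
  set pr := (if PySem.Str.isIn "=" text = true then
      match PySem.Str.splitMax? text "=" 1 with
      | some (a :: b :: _) => (a, b)
      | _ => (text, text)
    else (text, text)) with hpr
  split_ifs at h with h1 h2 h3
  · injection h with h
    rw [Prod.ext_iff] at h
    obtain ⟨rfl, rfl⟩ := h
    exact ⟨pmc_strip_idem _, h2, pmc_strip_idem _, h2⟩
  · injection h with h
    rw [Prod.ext_iff] at h
    obtain ⟨rfl, rfl⟩ := h
    exact ⟨pmc_strip_idem _, h2, pmc_strip_idem _, h3⟩

theorem pmcMergeStep_entry (st : List (List (String × String)) × PySem.Set String)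
    {t l : String} (ht : PySem.Str.strip t = t) (ht0 : t ≠ "")
    (hl : PySem.Str.strip l = l) (hl0 : l ≠ "") :
    pmcMergeStep st (pmcEntry t l) =
      if PySem.Set.contains st.2 t then st
      else (st.1 ++ [pmcEntry t l], PySem.Set.add st.2 t) := by
  unfold pmcMergeStep pmcEntry pmcDictGet
  simp only [List.find?, show (("test_id", t).1 == "test_id") = true by simp,
    show (("test_id", t).1 == "label") = false by simp,
    show (("label", l).1 == "label") = true by simp]
  simp [ht, hl, ht0, hl0]

theorem pmcStep (d : PySem.Dict String (List (String × String))) (raw : String) :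
    (pmcOne raw).foldl pmcMergeStep (d.values, d.keys) =
      ((pmcAltStep d raw).values, (pmcAltStep d raw).keys) := by
  rw [pmcAltStep_eq]
  unfold pmcOne
  cases hk : pmcKey raw with
  | none => simp
  | some tl =>
    obtain ⟨t, l⟩ := tl
    obtain ⟨ht, ht0, hl, hl0⟩ := pmcKey_props hk
    simp only [List.foldl_cons, List.foldl_nil, pmcMergeStep_entry _ ht ht0 hl hl0]
    by_cases hmem : t ∈ d.keys
    · have hc : d.contains t = true := (PySem.Dict.contains_iff_mem_keys d t).mpr hmem
      have hs : PySem.Set.contains d.keys t = true := (PySem.Set.contains_iff d.keys t).mpr hmem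
      simp [hc, hmem]
    · have hc : d.contains t = false := by
        rw [Bool.eq_false_iff]
        exact fun hh => hmem ((PySem.Dict.contains_iff_mem_keys d t).mp hh)
      have hs : PySem.Set.contains d.keys t = false := by
        rw [Bool.eq_false_iff]
        exact fun hh => hmem ((PySem.Set.contains_iff d.keys t).mp hh)
      have hitems := PySem.Dict.items_insert_of_not_contains d hc (v := pmcEntry t l)
      have hv : (d.insert t (pmcEntry t l)).values = d.values ++ [pmcEntry t l] := by
        simp only [PySem.Dict.values, hitems, List.map_append, List.map_cons, List.map_nil]
      have hkk : (d.insert t (pmcEntry t l)).keys = d.keys ++ [t] := by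
        simp only [PySem.Dict.keys, hitems, List.map_append, List.map_cons, List.map_nil]
      simp [hc, hv, hkk, hmem]

theorem pmcMain (values : List String) (d : PySem.Dict String (List (String × String))) :
    (values.flatMap pmcOne).foldl pmcMergeStep (d.values, d.keys) =
      ((values.foldl pmcAltStep d).values, (values.foldl pmcAltStep d).keys) := by
  induction values generalizing d with
  | nil => simp
  | cons r vs ih =>
    rw [List.flatMap_cons, List.foldl_append, List.foldl_cons, pmcStep, ih]

theorem pmcParsed_eq (values : List String)
    (acc : List (List (String × String))) :
    values.foldl pmcParseStep acc = acc ++ values.flatMap pmcOne := by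
  induction values generalizing acc with
  | nil => simp
  | cons r vs ih => rw [List.foldl_cons, pmcParseStep_eq, ih, List.flatMap_cons, List.append_assoc]

-- ===== VERDICT (by name: the statement is the Claim_ definition above) =====
theorem parse_manual_cases_spec : Claim_equal_parse_manual_cases := by
  intro values _
  show parse_manual_cases values = parse_manual_cases_alt values
  unfold parse_manual_cases merge_case_entries parse_manual_cases_alt
  rw [pmcParsed_eq]
  simp only [List.foldl_cons, List.foldl_nil, List.nil_append]
  have h0 : (([], PySem.Set.empty) :
      List (List (String × String)) × PySem.Set String) =
      ((PySem.Dict.empty : PySem.Dict String (List (String × String))).values,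
       (PySem.Dict.empty : PySem.Dict String (List (String × String))).keys) := rfl
  rw [h0, pmcMain]
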